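-- pv_equiv track=rewrite | github.com/Twodragon0/tech-blog | scripts/fix_missing_front_matter_close.py | find_insertion_point
-- ===== SOURCE A (Python) =====
-- def is_liquid_or_content_start(line: str) -> bool:
--     """Return True if the line marks the beginning of post content (not YAML)."""
--     stripped = line.rstrip('\n')
--
--     # Liquid tags: {% ... %} or {%- ... -%}
--     if stripped.startswith('{%') or stripped.startswith('{%-'):
--         return True
--
--     # Markdown heading
--     if stripped.startswith('#'):
--         return True
--
--     # HTML tags (sometimes used directly after front matter)
--     if stripped.startswith('<') and not stripped.startswith('<!--'):
--         return True
--
--     # Explicit horizontal rule used as separator (three or more dashes)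
--     # But we only treat standalone --- as "content" if we've already passed YAML
--     # (handled in the caller)
--
--     return False
--
-- def find_insertion_point(lines: list[str]) -> int | None:
--     """
--     Scan lines (0-indexed) starting from line index 1 (after opening ---).
--
--     Returns the 0-based index where `---\\n` should be INSERTED (i.e. the line
--     currently at that index will be shifted down).
--
--     Returns None if the file already has a proper closing --- within 60 lines,
--     or if we cannot determine a safe insertion point.
--     """
--     if not lines:
--         return None
--
--     # Line 0 must be the opening ---
--     if lines[0].rstrip('\n') != '---':
--         return None
--
--     # Check if there is already a closing --- within the first 60 lines
--     for i in range(1, min(61, len(lines))):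
--         line = lines[i].rstrip('\n')
--         if line == '---':
--             return None  # already properly closed
--
--         # If we hit Liquid/content before finding ---, we need to insert
--         if is_liquid_or_content_start(lines[i]):
--             # Walk backwards to find last non-blank YAML line
--             insert_at = i  # default: insert right before this line
--             # Look back for the last substantive YAML line
--             j = i - 1
--             while j >= 1 and lines[j].strip() == '':
--                 j -= 1
--             # Insert after that last YAML line (and after any trailing blanks)
--             # We want: last_yaml_line \n ---\n \n liquid_line
--             # So insertion index = j + 1
--             insert_at = j + 1
--             return insert_at
--
--     # Scanned 60 lines without finding either --- or Liquid — skip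
--     return None
-- ===== SOURCE B (Python) =====
-- def is_liquid_or_content_start(line: str) -> bool:
--     """Return True if the line marks the beginning of post content (not YAML)."""
--     stripped = line.rstrip('\n')
--     if stripped.startswith('{%') or stripped.startswith('{%-'):
--         return True
--     if stripped.startswith('#'):
--         return True
--     if stripped.startswith('<') and not stripped.startswith('<!--'):
--         return True
--     return False
--
-- def find_insertion_point(lines):
--     if not lines:
--         return None
--     if lines[0].rstrip('\n') != '---':
--         return None
--     last_nonblank = 0
--     for i in range(1, min(61, len(lines))):
--         line = lines[i]
--         if line.rstrip('\n') == '---':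
--             return None
--         if is_liquid_or_content_start(line):
--             return last_nonblank + 1
--         if line.strip() != '':
--             last_nonblank = i
--     return None
-- ===== Notes on version B (the rewrite author's own statement) =====
-- stated objective: simpler
-- what changed: Replaced A's backward inner while-walk (from each content line back over blanks) by a single forward scan that threads a last_nonblank accumulator, eliminating the nested loop.
import Mathlib
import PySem

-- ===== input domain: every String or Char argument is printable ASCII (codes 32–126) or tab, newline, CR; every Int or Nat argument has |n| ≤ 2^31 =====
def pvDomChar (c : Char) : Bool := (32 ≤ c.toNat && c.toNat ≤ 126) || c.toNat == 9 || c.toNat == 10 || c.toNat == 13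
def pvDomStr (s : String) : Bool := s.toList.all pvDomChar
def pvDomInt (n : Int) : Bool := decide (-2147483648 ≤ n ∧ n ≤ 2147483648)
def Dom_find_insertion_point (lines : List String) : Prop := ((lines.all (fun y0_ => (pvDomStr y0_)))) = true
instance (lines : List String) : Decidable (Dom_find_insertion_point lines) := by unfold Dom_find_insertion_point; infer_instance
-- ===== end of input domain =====

-- B replaces A's backward inner walk with a last_nonblank accumulator threaded through one forward scan (objective: simpler).


-- ===== PORT A =====
-- line.rstrip('\n') : drop trailing '\n' characters (exact; PySem has no single-char rstrip primitive)
def rstripNl (cs : List Char) : List Char := (cs.reverse.dropWhile (· == '\n')).reverse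

def is_liquid_or_content_start (line : String) : Bool :=
  let stripped := rstripNl line.toList
  if PySem.Chars.startswith stripped "{%".toList || PySem.Chars.startswith stripped "{%-".toList then true
  else if PySem.Chars.startswith stripped "#".toList then true
  else if PySem.Chars.startswith stripped "<".toList && !(PySem.Chars.startswith stripped "<!--".toList) then true
  else false

-- A's inner backward walk: j := i-1; while j >= 1 and lines[j].strip() == '': j -= 1; result j
def backWalk (lines : List String) : Nat → Nat
  | 0 => 0
  | j+1 => if PySem.Str.strip (lines.getD (j+1) "") == "" then backWalk lines j else j+1

-- A's forward scan over range(1, min(61, len(lines)))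
def loopA (lines : List String) (i stop : Nat) : Option Int :=
  if i < stop then
    if rstripNl (lines.getD i "").toList == "---".toList then none
    else if is_liquid_or_content_start (lines.getD i "") then
      some ((backWalk lines (i - 1) : Int) + 1)
    else loopA lines (i+1) stop
  else none
  termination_by stop - i

def find_insertion_point (lines : List String) : Option Int :=
  if lines.isEmpty then none
  else if rstripNl (lines.getD 0 "").toList ≠ "---".toList then none
  else loopA lines 1 (min 61 lines.length)

-- ===== PORT B =====
-- B's single forward scan carrying last_nonblank
def loopB (lines : List String) (i stop lastNonblank : Nat) : Option Int :=
  if i < stop then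
    let line := lines.getD i ""
    if rstripNl line.toList == "---".toList then none
    else if is_liquid_or_content_start line then some ((lastNonblank : Int) + 1)
    else loopB lines (i+1) stop (if PySem.Str.strip line == "" then lastNonblank else i)
  else none
  termination_by stop - i

def find_insertion_point_alt (lines : List String) : Option Int :=
  if lines.isEmpty then none
  else if rstripNl (lines.getD 0 "").toList ≠ "---".toList then none
  else loopB lines 1 (min 61 lines.length) 0

-- ===== PRECONDITION & SPEC =====
def Spec_find_insertion_point (lines : List String) (out : Option Int) : Prop := out = find_insertion_point_alt lines
instance (lines : List String) (out : Option Int) : Decidable (Spec_find_insertion_point lines out) := by unfold Spec_find_insertion_point; infer_instance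

-- ===== CLAIM (what is proved, stated in full; the proofs are below) =====
def Claim_equal_find_insertion_point : Prop := ∀ (lines : List String), Dom_find_insertion_point lines → Spec_find_insertion_point lines (find_insertion_point lines)

-- ===== LEMMAS AND PROOFS =====
-- Invariant: at index i ≥ 1, B's accumulator equals A's backward walk from i-1.
theorem loopB_eq_loopA (lines : List String) (stop : Nat) :
    ∀ (n i : Nat), 1 ≤ i → stop ≤ i + n →
      loopB lines i stop (backWalk lines (i - 1)) = loopA lines i stop := by
  intro n
  induction n with
  | zero =>
    intro i _ hle
    rw [loopB, loopA]
    simp [Nat.not_lt.mpr (by omega : stop ≤ i)]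
  | succ n ih =>
    intro i hi hle
    rw [loopB, loopA]
    by_cases hlt : i < stop
    · simp only [if_pos hlt]
      split
      · rfl
      · split
        · rfl
        · -- continue branch: the new accumulator is backWalk lines i
          have hacc : (if PySem.Str.strip (lines.getD i "") == "" then backWalk lines (i - 1)
                        else i) = backWalk lines ((i + 1) - 1) := by
            obtain ⟨j, rfl⟩ : ∃ j, i = j + 1 := ⟨i - 1, by omega⟩
            simp [backWalk]
          rw [hacc]
          exact ih (i + 1) (by omega) (by omega)
    · simp [hlt]

theorem find_insertion_point_spec : Claim_equal_find_insertion_point := by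
  intro lines _
  unfold Spec_find_insertion_point find_insertion_point find_insertion_point_alt
  split_ifs with h1 h2
  · rfl
  · rfl
  · have h := loopB_eq_loopA lines (min 61 lines.length) (min 61 lines.length) 1 le_rfl (by omega)
    simpa [backWalk] using h.symm
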